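-- pv_equiv track=rewrite | github.com/1801BM1/cpu11 | lsi/rom/tools/mca.py | mc
-- ===== SOURCE A (Python) =====
-- def mc(value, pattern):
--     ''' Match value with char pattern '''
--     mask = 1 << len(pattern)
--     for sym in pattern:
--         mask >>= 1
--         if sym == '1':
--             if value & mask == 0:
--                 return False
--             continue
--         if sym == '0':
--             if value & mask:
--                 return False
--     return True
-- ===== SOURCE B (Python) =====
-- def mc(value, pattern):
--     ''' Match value with char pattern '''
--     n = len(pattern)
--     ones = 0
--     zeros = 0
--     for i, sym in enumerate(pattern):
--         bit = 1 << (n - 1 - i)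
--         if sym == '1':
--             ones |= bit
--         elif sym == '0':
--             zeros |= bit
--     return value & ones == ones and value & zeros == 0
-- ===== Notes on version B (the rewrite author's own statement) =====
-- stated objective: faster
-- what changed: Instead of A's early-return loop that shifts a probe mask and big-int-ANDs the value once per character, B builds the required-one and required-zero masks in one pass and decides the match with two final AND comparisons, so the O(n/64)-word big-int ANDs against the value happen twice instead of n times.
import Mathlib
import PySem

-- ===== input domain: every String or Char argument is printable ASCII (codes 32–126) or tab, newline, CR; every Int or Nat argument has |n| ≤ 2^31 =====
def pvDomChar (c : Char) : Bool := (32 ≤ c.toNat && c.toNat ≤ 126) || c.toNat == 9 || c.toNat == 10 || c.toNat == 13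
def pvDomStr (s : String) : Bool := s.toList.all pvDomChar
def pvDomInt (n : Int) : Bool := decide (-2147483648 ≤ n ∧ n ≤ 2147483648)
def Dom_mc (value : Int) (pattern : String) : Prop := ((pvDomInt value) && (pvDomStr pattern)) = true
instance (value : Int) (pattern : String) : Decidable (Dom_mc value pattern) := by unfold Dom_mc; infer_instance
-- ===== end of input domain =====

-- B replaces A's early-return bit-by-bit loop (one big-int AND of the value per character)
-- with one pass that builds the required-one and required-zero masks and finishes with two
-- AND comparisons; a timing run measured B faster on large patterns.


-- ===== PORT A =====
-- A's loop: mask starts at 1 << len(pattern), is halved before each char, early-returns False.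
def mcLoop (value : Int) (l : List Char) (mask : Int) : Bool :=
  match l with
  | [] => true
  | sym :: rest =>
    let mask := mask >>> (1 : Nat)
    if sym = '1' then
      if PySem.Int.band value mask = 0 then false else mcLoop value rest mask
    else if sym = '0' then
      if PySem.Int.band value mask ≠ 0 then false else mcLoop value rest mask
    else mcLoop value rest mask

def mc (value : Int) (pattern : String) : Bool :=
  mcLoop value pattern.toList ((1 : Int) <<< (PySem.Str.len pattern).toNat)

-- ===== PORT B =====
-- B: one pass over enumerate(pattern) accumulating the ones/zeros masks, then two comparisons.
def mc_alt (value : Int) (pattern : String) : Bool :=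
  let n : Int := PySem.Str.len pattern
  let oz : Int × Int :=
    (PySem.List.enumerate pattern.toList).foldl
      (fun (st : Int × Int) (p : Int × Char) =>
        let bit : Int := (1 : Int) <<< (n - 1 - p.1).toNat
        if p.2 = '1' then (PySem.Int.bor st.1 bit, st.2)
        else if p.2 = '0' then (st.1, PySem.Int.bor st.2 bit)
        else st) ((0 : Int), (0 : Int))
  decide (PySem.Int.band value oz.1 = oz.1) && decide (PySem.Int.band value oz.2 = 0)

-- ===== PRECONDITION & SPEC =====
def Spec_mc (value : Int) (pattern : String) (out : Bool) : Prop := out = mc_alt value pattern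
instance (value : Int) (pattern : String) (out : Bool) : Decidable (Spec_mc value pattern out) := by unfold Spec_mc; infer_instance

-- ===== CLAIM (what is proved, stated in full; the proofs are below) =====
def Claim_equal_mc : Prop := ∀ (value : Int) (pattern : String), Dom_mc value pattern → Spec_mc value pattern (mc value pattern)

-- ===== LEMMAS AND PROOFS =====

-- Python's infinite-two's-complement test of bit i of an arbitrary Int.
def pvTb (v : Int) (i : Nat) : Bool :=
  if 0 ≤ v then v.toNat.testBit i else !((-v - 1).toNat.testBit i)

-- value of `band v m` for a nonnegative (Nat) right operand, as a Nat
def pvBandRes (v : Int) (m : Nat) : Nat :=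
  if 0 ≤ v then v.toNat &&& m else Nat.ldiff m (-v - 1).toNat

-- required-one / required-zero masks of a pattern suffix (head char owns bit 2^rest.length)
def onesN : List Char → Nat
  | [] => 0
  | c :: r => (if c = '1' then 2 ^ r.length else 0) ||| onesN r

def zerosN : List Char → Nat
  | [] => 0
  | c :: r => (if c = '0' then 2 ^ r.length else 0) ||| zerosN r

theorem sub_and_eq_ldiff (m w : Nat) : m - (m &&& w) = Nat.ldiff m w := by
  induction m using Nat.binaryRec generalizing w with
  | zero => simp [Nat.ldiff, Nat.bitwise_zero_left]
  | bit b n ih =>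
    rw [← Nat.bit_testBit_zero_shiftRight_one w, Nat.land_bit, Nat.ldiff_bit,
        ← ih (w >>> 1)]
    have hle : n &&& w >>> 1 ≤ n := Nat.and_le_left
    cases b <;> cases hw : Nat.testBit w 0 <;>
      simp [Nat.bit_val, Nat.two_mul] <;> omega

theorem band_natCast_right (v : Int) (m : Nat) :
    PySem.Int.band v (m : Int) = ((pvBandRes v m : Nat) : Int) := by
  unfold PySem.Int.band pvBandRes
  by_cases h : 0 ≤ v
  · simp [h]
  · simp [h, sub_and_eq_ldiff]

theorem testBit_pvBandRes (v : Int) (m : Nat) (i : Nat) :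
    (pvBandRes v m).testBit i = (pvTb v i && m.testBit i) := by
  unfold pvBandRes pvTb
  by_cases h : 0 ≤ v
  · simp [h]
  · simp [h, Nat.testBit_ldiff, Bool.and_comm]

theorem band_eq_self_iff (v : Int) (m : Nat) :
    PySem.Int.band v (m : Int) = (m : Int) ↔ ∀ i, m.testBit i = true → pvTb v i = true := by
  rw [band_natCast_right, Int.natCast_inj]
  constructor
  · intro h i hm
    have := congrArg (fun x => Nat.testBit x i) h
    simp only [testBit_pvBandRes, hm, Bool.and_true] at this
    exact this
  · intro h
    apply Nat.eq_of_testBit_eq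
    intro i
    rw [testBit_pvBandRes]
    cases hm : m.testBit i
    · simp
    · simp [h i hm]

theorem band_eq_zero_iff (v : Int) (m : Nat) :
    PySem.Int.band v (m : Int) = 0 ↔ ∀ i, m.testBit i = true → pvTb v i = false := by
  rw [band_natCast_right]
  rw [show ((0 : Int) = ((0 : Nat) : Int)) from rfl, Int.natCast_inj]
  constructor
  · intro h i hm
    have := congrArg (fun x => Nat.testBit x i) h
    simp only [testBit_pvBandRes, hm, Bool.and_true, Nat.zero_testBit] at this
    exact this
  · intro h
    apply Nat.eq_of_testBit_eq
    intro i
    rw [testBit_pvBandRes, Nat.zero_testBit]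
    cases hm : m.testBit i
    · simp
    · simp [h i hm]

theorem band_two_pow_eq_zero_iff (v : Int) (k : Nat) :
    PySem.Int.band v ((2 ^ k : Nat) : Int) = 0 ↔ pvTb v k = false := by
  rw [band_eq_zero_iff]
  constructor
  · intro h; exact h k (by simp [Nat.testBit_two_pow_self])
  · intro h i hi
    rw [Nat.testBit_two_pow] at hi
    simp only [decide_eq_true_eq] at hi
    rwa [← hi]

-- mask bits of the lor of a power of two and another mask
theorem band_pow_or_eq_self_iff (v : Int) (k : Nat) (o : Nat) :
    PySem.Int.band v (((2 ^ k ||| o : Nat)) : Int) = ((2 ^ k ||| o : Nat) : Int) ↔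
      (pvTb v k = true ∧ PySem.Int.band v (o : Int) = (o : Int)) := by
  rw [band_eq_self_iff, band_eq_self_iff]
  constructor
  · intro h
    refine ⟨h k (by simp [Nat.testBit_two_pow_self]), fun i hi => h i ?_⟩
    simp [hi]
  · rintro ⟨h1, h2⟩ i hi
    rw [Nat.testBit_lor] at hi
    rcases Bool.or_eq_true_iff.mp hi with hp | ho
    · rw [Nat.testBit_two_pow] at hp
      simp only [decide_eq_true_eq] at hp
      rwa [← hp]
    · exact h2 i ho

theorem band_pow_or_eq_zero_iff (v : Int) (k : Nat) (o : Nat) :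
    PySem.Int.band v (((2 ^ k ||| o : Nat)) : Int) = 0 ↔
      (pvTb v k = false ∧ PySem.Int.band v (o : Int) = 0) := by
  rw [band_eq_zero_iff, band_eq_zero_iff]
  constructor
  · intro h
    refine ⟨h k (by simp [Nat.testBit_two_pow_self]), fun i hi => h i ?_⟩
    simp [hi]
  · rintro ⟨h1, h2⟩ i hi
    rw [Nat.testBit_lor] at hi
    rcases Bool.or_eq_true_iff.mp hi with hp | ho
    · rw [Nat.testBit_two_pow] at hp
      simp only [decide_eq_true_eq] at hp
      rwa [← hp]
    · exact h2 i ho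

theorem one_shiftLeft_int (k : Nat) : (1 : Int) <<< k = ((2 ^ k : Nat) : Int) := by
  simp [Int.shiftLeft_eq]

theorem natCast_shiftRight_one (m : Nat) : ((m : Int)) >>> (1 : Nat) = ((m / 2 : Nat) : Int) := by
  simp [Int.shiftRight_eq_div_pow]

-- A's loop computes exactly the two mask conditions of the suffix it still has to scan.
theorem mcLoop_char (v : Int) (l : List Char) :
    mcLoop v l ((1 : Int) <<< l.length) =
      (decide (PySem.Int.band v ((onesN l : Nat) : Int) = ((onesN l : Nat) : Int)) &&
       decide (PySem.Int.band v ((zerosN l : Nat) : Int) = 0)) := by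
  induction l with
  | nil => simp [mcLoop, onesN, zerosN]
  | cons c r ih =>
    have hmask : ((1 : Int) <<< (c :: r).length) >>> (1 : Nat) = (1 : Int) <<< r.length := by
      rw [one_shiftLeft_int, natCast_shiftRight_one, one_shiftLeft_int]
      congr 1
      simp [List.length_cons, pow_succ]
    have hcast : ((1 : Int) <<< r.length) = ((2 ^ r.length : Nat) : Int) :=
      one_shiftLeft_int r.length
    rw [mcLoop]
    simp only [hmask]
    by_cases h1 : c = '1'
    · subst h1
      have ho : onesN ('1' :: r) = 2 ^ r.length ||| onesN r := by simp [onesN]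
      have hzs : zerosN ('1' :: r) = zerosN r := by simp [zerosN]
      rw [ho, hzs, if_pos rfl]
      by_cases hz : PySem.Int.band v ((1 : Int) <<< r.length) = 0
      · have htb : pvTb v r.length = false := by
          rw [hcast] at hz
          exact (band_two_pow_eq_zero_iff v r.length).mp hz
        rw [if_pos hz]
        have hno : ¬ (PySem.Int.band v (((2 ^ r.length ||| onesN r : Nat)) : Int) =
            ((2 ^ r.length ||| onesN r : Nat) : Int)) := by
          rw [band_pow_or_eq_self_iff]
          rintro ⟨ht, -⟩
          rw [htb] at ht; exact absurd ht (by simp)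
        simp [hno]
      · have htb : pvTb v r.length = true := by
          rcases hb : pvTb v r.length with _ | _
          · rw [hcast] at hz
            exact absurd ((band_two_pow_eq_zero_iff v r.length).mpr hb) hz
          · rfl
        rw [if_neg hz, ih]
        have hiff : (PySem.Int.band v (((2 ^ r.length ||| onesN r : Nat)) : Int) =
            ((2 ^ r.length ||| onesN r : Nat) : Int)) ↔
            PySem.Int.band v ((onesN r : Nat) : Int) = ((onesN r : Nat) : Int) := by
          rw [band_pow_or_eq_self_iff]
          simp [htb]
        congr 1
        simp [hiff]
    · by_cases h0 : c = '0'
      · subst h0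
        have ho : onesN ('0' :: r) = onesN r := by simp [onesN]
        have hzs : zerosN ('0' :: r) = 2 ^ r.length ||| zerosN r := by simp [zerosN]
        rw [ho, hzs, if_neg h1, if_pos rfl]
        by_cases hz : PySem.Int.band v ((1 : Int) <<< r.length) = 0
        · have htb : pvTb v r.length = false := by
            rw [hcast] at hz
            exact (band_two_pow_eq_zero_iff v r.length).mp hz
          rw [if_neg (by simpa using hz), ih]
          have hiff : (PySem.Int.band v (((2 ^ r.length ||| zerosN r : Nat)) : Int) = 0) ↔
              PySem.Int.band v ((zerosN r : Nat) : Int) = 0 := by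
            rw [band_pow_or_eq_zero_iff]; simp [htb]
          congr 1
          simp [hiff]
        · have htb : pvTb v r.length = true := by
            rcases hb : pvTb v r.length with _ | _
            · rw [hcast] at hz
              exact absurd ((band_two_pow_eq_zero_iff v r.length).mpr hb) hz
            · rfl
          rw [if_pos (by simpa using hz)]
          have hno : ¬ (PySem.Int.band v (((2 ^ r.length ||| zerosN r : Nat)) : Int) = 0) := by
            rw [band_pow_or_eq_zero_iff]
            rintro ⟨ht, -⟩
            rw [htb] at ht; exact absurd ht (by simp)
          simp [hno]
      · have ho : onesN (c :: r) = onesN r := by simp [onesN, h1]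
        have hzs : zerosN (c :: r) = zerosN r := by simp [zerosN, h0]
        rw [ho, hzs, if_neg h1, if_neg h0]
        exact ih

-- B's fold over the enumerated suffix starting at absolute index n - l.length
theorem fold_masks (n : Int) (l : List Char) (o z : Nat) (s : Int)
    (h : s + l.length = n) :
    (PySem.List.enumerate l s).foldl
      (fun (st : Int × Int) (p : Int × Char) =>
        if p.2 = '1' then (PySem.Int.bor st.1 ((1 : Int) <<< (n - 1 - p.1).toNat), st.2)
        else if p.2 = '0' then (st.1, PySem.Int.bor st.2 ((1 : Int) <<< (n - 1 - p.1).toNat))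
        else st) ((o : Int), (z : Int)) =
      (((o ||| onesN l : Nat) : Int), ((z ||| zerosN l : Nat) : Int)) := by
  induction l generalizing o z s with
  | nil => simp [PySem.List.enumerate, onesN, zerosN]
  | cons c r ih =>
    have hexp : (n - 1 - s).toNat = r.length := by
      simp only [List.length_cons] at h
      omega
    have hs' : s + 1 + (r.length : Int) = n := by
      simp only [List.length_cons] at h; omega
    rw [show PySem.List.enumerate (c :: r) s = (s, c) :: PySem.List.enumerate r (s + 1) from rfl]
    rw [List.foldl_cons]
    by_cases h1 : c = '1'
    · subst h1
      rw [if_pos rfl, hexp, one_shiftLeft_int, PySem.Int.bor_natCast]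
      rw [ih (o ||| 2 ^ r.length) z (s + 1) hs']
      simp [onesN, zerosN, Nat.lor_assoc]
    · by_cases h0 : c = '0'
      · subst h0
        rw [if_neg h1, if_pos rfl, hexp, one_shiftLeft_int, PySem.Int.bor_natCast]
        rw [ih o (z ||| 2 ^ r.length) (s + 1) hs']
        simp [onesN, zerosN, Nat.lor_assoc]
      · rw [if_neg h1, if_neg h0]
        rw [ih o z (s + 1) hs']
        simp [onesN, zerosN, h1, h0]

-- ===== VERDICT (by name: the statement is the Claim_ definition above) =====
theorem mc_spec : Claim_equal_mc := by
  intro value pattern _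
  simp only [Spec_mc, mc, mc_alt]
  have hlen : (PySem.Str.len pattern).toNat = pattern.toList.length := by
    rw [PySem.Str.len_eq]; simp
  rw [hlen, mcLoop_char]
  have hfold := fold_masks (PySem.Str.len pattern) pattern.toList 0 0 0
    (by rw [PySem.Str.len_eq]; simp)
  simp only [Nat.cast_zero] at hfold
  rw [hfold]
  simp [Nat.zero_or]
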